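-- pv_equiv track=rewrite | github.com/dyi919/algorithm-practice | practice/2022_12/221205_Programmers_CutNSquareArray/221205_Programmers_CutNSquareArray.py | solution
-- ===== SOURCE A (Python) =====
-- def solution(n, left, right):
--     answer = []
--
--     start_row = left // n + 1
--     start_col = left % n + 1
--     end_row = right // n + 1
--     end_col = right % n + 1
--
--     for i in range(start_row, end_row+1):
--         j_from = start_col if i == start_row else 1
--         j_to = end_col+1 if i == end_row else n+1
--         for j in range(j_from, j_to):
--             answer.append(max(i, j))
--
--     return answer
-- ===== SOURCE B (Python) =====
-- def solution(n, left, right):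
--     return [max(k // n, k % n) + 1 for k in range(left, right + 1)]
-- ===== Notes on version B (the rewrite author's own statement) =====
-- stated objective: simpler
-- what changed: Replaces A's nested row/column loops (with per-row start/end column cases) by one flat pass over range(left, right+1), computing each value directly from the flat index as max(k//n, k%n)+1.
-- outside the precondition, e.g. on solution(0, 0, 1): A raises ZeroDivisionError, B raises ZeroDivisionError; on solution(-5, -8, -4): A returns [], B returns [2, 2, 2, 2, 1]
import Mathlib
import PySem

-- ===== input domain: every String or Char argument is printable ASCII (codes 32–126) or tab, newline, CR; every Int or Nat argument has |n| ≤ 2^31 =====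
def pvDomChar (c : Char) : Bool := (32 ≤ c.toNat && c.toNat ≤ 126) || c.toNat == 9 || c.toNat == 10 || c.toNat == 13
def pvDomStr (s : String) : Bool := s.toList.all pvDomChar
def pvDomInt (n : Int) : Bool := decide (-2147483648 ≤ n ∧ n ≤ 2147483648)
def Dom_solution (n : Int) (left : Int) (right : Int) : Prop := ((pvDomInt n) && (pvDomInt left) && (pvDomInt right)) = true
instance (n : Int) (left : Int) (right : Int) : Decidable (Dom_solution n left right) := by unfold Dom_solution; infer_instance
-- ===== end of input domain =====

-- B replaces A's nested row/column loops by one flat pass computing max(k//n, k%n)+1 from the flat index (simpler decomposition, same cost).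

-- ===== PORT A =====
def solution (n : Int) (left : Int) (right : Int) : List Int :=
  let answer : List Int := []
  let start_row := PySem.Int.floordiv left n + 1
  let start_col := PySem.Int.mod left n + 1
  let end_row := PySem.Int.floordiv right n + 1
  let end_col := PySem.Int.mod right n + 1
  (PySem.List.pyRange start_row (end_row + 1) 1).foldl (fun answer i =>
    let j_from := if i = start_row then start_col else 1
    let j_to := if i = end_row then end_col + 1 else n + 1
    (PySem.List.pyRange j_from j_to 1).foldl (fun answer j => answer ++ [max i j]) answer) answer

-- ===== PORT B =====
def solution_alt (n : Int) (left : Int) (right : Int) : List Int :=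
  (PySem.List.pyRange left (right + 1) 1).map
    (fun k => max (PySem.Int.floordiv k n) (PySem.Int.mod k n) + 1)

-- ===== PRECONDITION & SPEC =====
-- Pre_ excludes n ≤ 0: at n = 0 the Python A raises ZeroDivisionError, and a negative n is
-- outside the natural domain of an n×n grid (A's nested ranges are then accidentally empty or
-- truncated by Python's divisor-sign floor division, and B naturally disagrees there).
def Pre_solution (n : Int) (left : Int) (right : Int) : Prop := 1 ≤ n
instance (n : Int) (left : Int) (right : Int) : Decidable (Pre_solution n left right) := by unfold Pre_solution; infer_instance
def pvWitness_solution : Int × Int × Int := (3, 2, 7)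
def Spec_solution (n : Int) (left : Int) (right : Int) (out : List Int) : Prop := out = solution_alt n left right
instance (n : Int) (left : Int) (right : Int) (out : List Int) : Decidable (Spec_solution n left right out) := by unfold Spec_solution; infer_instance

-- ===== CLAIM (what is proved, stated in full; the proofs are below) =====
def Claim_equal_solution : Prop := ∀ (n : Int) (left : Int) (right : Int), Dom_solution n left right → Pre_solution n left right → Spec_solution n left right (solution n left right)

-- ===== LEMMAS AND PROOFS =====

-- A's nested loops as a flatMap of per-row maps.
theorem solution_rows (n left right : Int) :
    solution n left right =
      (PySem.List.pyRange (PySem.Int.floordiv left n + 1) (PySem.Int.floordiv right n + 1 + 1) 1).flatMap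
        (fun i =>
          (PySem.List.pyRange
              (if i = PySem.Int.floordiv left n + 1 then PySem.Int.mod left n + 1 else 1)
              (if i = PySem.Int.floordiv right n + 1 then PySem.Int.mod right n + 1 + 1 else n + 1) 1).map
            (fun j => max i j)) := by
  unfold solution
  simp only [PySem.List.foldl_append_singleton_eq_map, PySem.List.foldl_append_eq_flatMap,
    List.nil_append]

-- One row: columns md l + 1 .. b - q*n of row q+1 are the flat indices l .. b-1.
theorem row_eq (n q l b : Int) (hn : 0 < n) (h1 : q * n ≤ l) (h2 : l < (q + 1) * n)
    (h4 : b ≤ (q + 1) * n) :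
    (PySem.List.pyRange (PySem.Int.mod l n + 1) (b - q * n + 1) 1).map (fun j => max (q + 1) j)
      = (PySem.List.pyRange l b 1).map
          (fun k => max (PySem.Int.floordiv k n) (PySem.Int.mod k n) + 1) := by
  have hfd : PySem.Int.floordiv l n = q := (PySem.Int.floordiv_eq_iff_of_pos hn).mpr ⟨h1, h2⟩
  have hmul := PySem.Int.floordiv_mul_add_mod l n
  rw [hfd] at hmul
  have hmd : PySem.Int.mod l n = l - q * n := by linarith
  rw [hmd, PySem.List.pyRange_one, PySem.List.pyRange_one, List.map_map, List.map_map]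
  have hlen : b - q * n + 1 - (l - q * n + 1) = b - l := by ring
  rw [hlen]
  apply List.map_congr_left
  intro k hk
  rw [List.mem_range] at hk
  have hkb : (k : Int) < b - l := by omega
  have hfd2 : PySem.Int.floordiv (l + (k : Int)) n = q := by
    refine (PySem.Int.floordiv_eq_iff_of_pos hn).mpr ⟨by linarith [Int.natCast_nonneg k], by linarith⟩
  have hmul2 := PySem.Int.floordiv_mul_add_mod (l + (k : Int)) n
  rw [hfd2] at hmul2
  have hmd2 : PySem.Int.mod (l + (k : Int)) n = l + (k : Int) - q * n := by linarith
  simp only [Function.comp]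
  rw [hfd2, hmd2]
  generalize q * n = w
  omega

-- Main induction on the number of rows.
theorem core (n : Int) (hn : 0 < n) : ∀ (t : Nat) (l r : Int),
    (PySem.Int.floordiv r n - PySem.Int.floordiv l n).toNat = t →
    (PySem.List.pyRange (PySem.Int.floordiv l n + 1) (PySem.Int.floordiv r n + 1 + 1) 1).flatMap
        (fun i =>
          (PySem.List.pyRange
              (if i = PySem.Int.floordiv l n + 1 then PySem.Int.mod l n + 1 else 1)
              (if i = PySem.Int.floordiv r n + 1 then PySem.Int.mod r n + 1 + 1 else n + 1) 1).map
            (fun j => max i j))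
      = (PySem.List.pyRange l (r + 1) 1).map
          (fun k => max (PySem.Int.floordiv k n) (PySem.Int.mod k n) + 1) := by
  intro t
  induction t using Nat.strong_induction_on with
  | _ t ih =>
    intro l r ht
    have hlq := PySem.Int.floordiv_mul_add_mod l n
    have hrq := PySem.Int.floordiv_mul_add_mod r n
    have hl1 : PySem.Int.floordiv l n * n ≤ l ∧ l < (PySem.Int.floordiv l n + 1) * n :=
      (PySem.Int.floordiv_eq_iff_of_pos hn).mp rfl
    have hr1 : PySem.Int.floordiv r n * n ≤ r ∧ r < (PySem.Int.floordiv r n + 1) * n :=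
      (PySem.Int.floordiv_eq_iff_of_pos hn).mp rfl
    rcases lt_trichotomy (PySem.Int.floordiv r n) (PySem.Int.floordiv l n) with hlt | heq | hgt
    · -- no rows: both sides empty
      have hm : (PySem.Int.floordiv r n + 1) * n ≤ PySem.Int.floordiv l n * n := by
        have : PySem.Int.floordiv r n + 1 ≤ PySem.Int.floordiv l n := hlt
        exact mul_le_mul_of_nonneg_right this hn.le
      have hrl : r + 1 ≤ l := by nlinarith [hl1.1, hr1.2]
      rw [PySem.List.pyRange_one_eq_nil (by omega), PySem.List.pyRange_one_eq_nil hrl]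
      simp
    · -- single row
      set q := PySem.Int.floordiv l n with hq
      rw [heq]
      rw [show q + 1 + 1 = (q + 1) + 1 by ring, PySem.List.pyRange_one_singleton]
      simp only [List.flatMap_cons, List.flatMap_nil, List.append_nil]
      have hb : PySem.Int.mod r n + 1 + 1 = (r + 1) - q * n + 1 := by
        rw [heq] at hrq; linarith
      rw [hb]
      exact row_eq n q l (r + 1) hn hl1.1 hl1.2 (by rw [heq] at hr1; linarith [hr1.2])
    · -- more than one row: peel the first row, recurse on the rest
      set q := PySem.Int.floordiv l n with hq
      set m := (q + 1) * n with hm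
      have hfm : PySem.Int.floordiv m n = q + 1 :=
        (PySem.Int.floordiv_eq_iff_of_pos hn).mpr ⟨le_refl _, by nlinarith⟩
      have hmulm := PySem.Int.floordiv_mul_add_mod m n
      rw [hfm] at hmulm
      have hmdm : PySem.Int.mod m n = 0 := by linarith
      have hmr : m ≤ r := by
        have : (q + 1) * n ≤ PySem.Int.floordiv r n * n :=
          mul_le_mul_of_nonneg_right (by omega) hn.le
        linarith [hr1.1]
      have hlm : l < m := hl1.2
      -- split RHS at m
      rw [PySem.List.pyRange_one_append l m (r + 1) hlm.le (by linarith), List.map_append]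
      -- peel the head row on the LHS
      rw [PySem.List.pyRange_one_cons (show q + 1 < PySem.Int.floordiv r n + 1 + 1 by omega)]
      rw [List.flatMap_cons]
      congr 1
      · -- head row
        rw [if_pos rfl, if_neg (by omega)]
        rw [show n + 1 = m - q * n + 1 by rw [hm]; ring]
        exact row_eq n q l m hn hl1.1 hl1.2 (le_refl _)
      · -- remaining rows = A's rows for (m, r), then the induction hypothesis
        have htail :
            (PySem.List.pyRange (q + 1 + 1) (PySem.Int.floordiv r n + 1 + 1) 1).flatMap
                (fun i =>
                  (PySem.List.pyRange
                      (if i = q + 1 then PySem.Int.mod l n + 1 else 1)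
                      (if i = PySem.Int.floordiv r n + 1 then PySem.Int.mod r n + 1 + 1 else n + 1) 1).map
                    (fun j => max i j))
              = (PySem.List.pyRange (PySem.Int.floordiv m n + 1) (PySem.Int.floordiv r n + 1 + 1) 1).flatMap
                (fun i =>
                  (PySem.List.pyRange
                      (if i = PySem.Int.floordiv m n + 1 then PySem.Int.mod m n + 1 else 1)
                      (if i = PySem.Int.floordiv r n + 1 then PySem.Int.mod r n + 1 + 1 else n + 1) 1).map
                    (fun j => max i j)) := by
          rw [hfm, hmdm]
          apply List.flatMap_congr
          intro i hi
          rw [PySem.List.mem_pyRange_one] at hi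
          rw [if_neg (by omega)]
          rcases eq_or_ne i (q + 1 + 1) with h | h
          · rw [if_pos h]; norm_num
          · rw [if_neg h]
        rw [htail]
        exact ih (t - 1) (by omega) m r (by omega)

-- ===== VERDICT (by name: the statement is the Claim_ definition above) =====
theorem solution_spec : Claim_equal_solution := by
  intro n left right _hdom hpre
  unfold Spec_solution solution_alt
  rw [solution_rows]
  exact core n hpre _ left right rfl
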